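-- pv_equiv track=rewrite | github.com/aaronwppe/bp-pre-internship | python/116.py | get_integer
-- ===== SOURCE A (Python) =====
-- def get_integer(integers: tuple[int, ...]) -> int | None:
--     num = 0
--     mul = 10 ** (len(integers) - 1)
--
--     for i in integers:
--         if not isinstance(i, int) or i < 0:
--             return None
--
--         num += mul * i
--         mul //= 10
--
--     return num
-- ===== SOURCE B (Python) =====
-- def get_integer(integers: tuple[int, ...]) -> int | None:
--     for i in integers:
--         if not isinstance(i, int) or i < 0:
--             return None
--     num = 0
--     weight = 1
--     for d in reversed(integers):
--         num += d * weight
--         weight *= 10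
--     return num
-- ===== Notes on version B (the rewrite author's own statement) =====
-- stated objective: faster
-- what changed: Splits A's fused loop into two passes: a cheap validation scan, then a back-to-front accumulation with an ascending *=10 weight, instead of A's single forward loop that precomputes a 10**(n-1) big-integer multiplier and floor-divides it every step.
import Mathlib
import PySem

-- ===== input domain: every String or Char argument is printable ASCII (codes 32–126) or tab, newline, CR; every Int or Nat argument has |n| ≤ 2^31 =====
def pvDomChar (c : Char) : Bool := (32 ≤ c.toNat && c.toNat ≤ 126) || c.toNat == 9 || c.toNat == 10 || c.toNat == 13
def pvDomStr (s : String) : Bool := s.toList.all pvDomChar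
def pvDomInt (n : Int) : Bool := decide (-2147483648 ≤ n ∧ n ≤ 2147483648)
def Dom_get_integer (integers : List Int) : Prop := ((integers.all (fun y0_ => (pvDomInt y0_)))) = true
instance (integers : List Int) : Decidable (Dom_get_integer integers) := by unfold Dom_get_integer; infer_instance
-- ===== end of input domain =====

-- B splits A's fused loop into a validation pass plus a reversed accumulation with an ascending *=10
-- weight, instead of A's forward loop with a 10**(n-1) multiplier descended by floor division.


-- ===== PORT A =====
-- the loop: state (num, mul); early return None on a negative element
def get_integer_go (xs : List Int) (num mul : Int) : Option Int :=
  match xs with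
  | [] => some num
  | i :: rest =>
    if i < 0 then none
    else get_integer_go rest (num + mul * i) (PySem.Int.floordiv mul 10)

-- mul = 10 ** (len - 1); for the empty tuple Python makes this the float 0.1, which the
-- loop never uses (the Nat-subtraction value 10^0 here is equally unused), so the port is exact.
def get_integer (integers : List Int) : Option Int :=
  get_integer_go integers 0 (10 ^ (integers.length - 1))

-- ===== PORT B =====
-- validation pass, then the reversed loop over state (num, weight)
def get_integer_alt (integers : List Int) : Option Int :=
  if integers.any (fun i => decide (i < 0)) then none
  else
    some ((integers.reverse.foldl
      (fun (p : Int × Int) d => (p.1 + d * p.2, p.2 * 10)) (0, 1)).1)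

-- ===== PRECONDITION & SPEC =====
def Spec_get_integer (integers : List Int) (out : Option Int) : Prop := out = get_integer_alt integers
instance (integers : List Int) (out : Option Int) : Decidable (Spec_get_integer integers out) := by unfold Spec_get_integer; infer_instance

-- ===== CLAIM (what is proved, stated in full; the proofs are below) =====
def Claim_equal_get_integer : Prop := ∀ (integers : List Int), Dom_get_integer integers → Spec_get_integer integers (get_integer integers)

-- ===== LEMMAS AND PROOFS =====

-- B's fold from an arbitrary state, in terms of the fold from (0, 1)
theorem pv_fold_state (l : List Int) (a w : Int) :
    l.foldl (fun (p : Int × Int) d => (p.1 + d * p.2, p.2 * 10)) (a, w)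
    = (a + w * (l.foldl (fun (p : Int × Int) d => (p.1 + d * p.2, p.2 * 10)) (0, 1)).1,
       w * 10 ^ l.length) := by
  induction l generalizing a w with
  | nil => simp
  | cons d t ih =>
    simp only [List.foldl_cons]
    rw [ih (a + d * w) (w * 10), ih (0 + d * 1) (1 * 10)]
    simp only [Prod.mk.injEq, List.length_cons]
    refine ⟨by simp; ring_nf, by rw [pow_succ]; ring⟩

-- the loop of A, started with the right multiplier, computes B's reversed accumulation
theorem pv_go_eq (xs : List Int) (acc : Int) :
    get_integer_go xs acc (10 ^ (xs.length - 1))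
    = (if xs.any (fun i => decide (i < 0)) then none
       else some (acc + (xs.reverse.foldl
         (fun (p : Int × Int) d => (p.1 + d * p.2, p.2 * 10)) (0, 1)).1)) := by
  induction xs generalizing acc with
  | nil => simp [get_integer_go]
  | cons x rest ih =>
    simp only [get_integer_go, List.any_cons, Bool.or_eq_true, decide_eq_true_eq]
    by_cases hx : x < 0
    · simp [hx]
    · simp only [hx, if_false, false_or]
      have hsnd : (rest.reverse.foldl
            (fun (p : Int × Int) d => (p.1 + d * p.2, p.2 * 10)) (0, 1)).2
          = 10 ^ rest.length := by
        rw [pv_fold_state]; simp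
      have hrev : ((x :: rest).reverse.foldl
            (fun (p : Int × Int) d => (p.1 + d * p.2, p.2 * 10)) (0, 1)).1
          = (rest.reverse.foldl
            (fun (p : Int × Int) d => (p.1 + d * p.2, p.2 * 10)) (0, 1)).1
            + x * 10 ^ rest.length := by
        rw [List.reverse_cons, List.foldl_append]
        simp only [List.foldl_cons, List.foldl_nil]
        rw [hsnd]
      cases rest with
      | nil =>
        rw [hrev]
        simp [get_integer_go]
      | cons y t =>
        have hmul : PySem.Int.floordiv ((10 : Int) ^ ((x :: y :: t).length - 1)) 10
            = 10 ^ ((y :: t).length - 1) := by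
          rw [PySem.Int.floordiv_eq_ediv_of_pos (by norm_num : (0:Int) < 10)]
          have hlen : (x :: y :: t).length - 1 = ((y :: t).length - 1) + 1 := by
            simp
          rw [hlen, pow_succ]
          exact Int.mul_ediv_cancel _ (by norm_num)
        rw [hmul, ih]
        by_cases hr : (y :: t).any (fun i => decide (i < 0))
        · simp [hr]
        · simp only [hr]
          rw [hrev]
          have hlen2 : (x :: y :: t).length - 1 = (y :: t).length := by simp
          rw [hlen2]
          congr 1
          ring_nf

-- ===== VERDICT (by name: the statement is the Claim_ definition above) =====
theorem get_integer_spec : Claim_equal_get_integer := by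
  intro integers _
  unfold Spec_get_integer get_integer get_integer_alt
  rw [pv_go_eq integers 0]
  by_cases h : integers.any (fun i => decide (i < 0)) <;> simp [h]
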